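-- pv_equiv track=rewrite | github.com/myscloud/jointparse | word_seg/data_prep.py | get_second_labels
-- ===== SOURCE A (Python) =====
-- def get_second_labels(labels, n_left, n_right):
--     padded_labels = ([3] * n_left) + labels + ([3] * n_right)
--     second_labels = list()
--     for label_idx in range(n_left, len(padded_labels)-n_right):
--         labels_window = padded_labels[label_idx-n_left:label_idx+n_right+1]
--         label_sum = 0
--         for i in range(1, len(labels_window)):
--             label_sum *= 2
--             if labels_window[i-1] < labels_window[i] != 3:
--                 label_sum += 1
--
--         second_labels.append(label_sum)
--
--     return second_labels
-- ===== SOURCE B (Python) =====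
-- def get_second_labels(labels, n_left, n_right):
--     # One pass: precompute adjacency bits once, then maintain a rolling
--     # binary value (shift in the new bit, drop the oldest bit) per position.
--     n = len(labels)
--     if n == 0:
--         return []
--     padded = [3] * n_left + labels + [3] * n_right
--     bits = [1 if padded[j - 1] < padded[j] != 3 else 0
--             for j in range(1, len(padded))]
--     w = n_left + n_right
--     v = 0
--     for b in bits[:w]:
--         v = v * 2 + b
--     out = [v]
--     shift = 2 ** w
--     for k in range(n - 1):
--         v = v * 2 + bits[k + w] - bits[k] * shift
--         out.append(v)
--     return out
-- ===== Notes on version B (the rewrite author's own statement) =====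
-- stated objective: faster
-- what changed: Adjacency bits are computed once over the padded sequence and each output is obtained from the previous one by a rolling shift-in-new-bit / drop-oldest-bit update, instead of re-slicing a window and re-running a Horner loop per position.
-- outside the precondition, e.g. on get_second_labels([1, 2, 3], -1, 0): A returns [0, 0, 0, 0], B returns [1, 1.5, 4.0]
import Mathlib
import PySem

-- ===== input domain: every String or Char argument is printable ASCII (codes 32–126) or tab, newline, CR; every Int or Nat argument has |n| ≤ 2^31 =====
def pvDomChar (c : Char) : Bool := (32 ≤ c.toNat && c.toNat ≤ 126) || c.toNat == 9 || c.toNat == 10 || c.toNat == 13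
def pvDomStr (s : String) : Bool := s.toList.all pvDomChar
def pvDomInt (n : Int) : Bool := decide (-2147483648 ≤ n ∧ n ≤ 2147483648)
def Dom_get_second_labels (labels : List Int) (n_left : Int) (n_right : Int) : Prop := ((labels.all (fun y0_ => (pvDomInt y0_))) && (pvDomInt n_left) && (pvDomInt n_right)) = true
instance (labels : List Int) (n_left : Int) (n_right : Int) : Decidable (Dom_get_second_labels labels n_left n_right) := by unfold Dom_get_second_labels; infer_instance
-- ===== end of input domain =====

-- B computes the adjacency bits of the padded sequence once and maintains a rolling binary
-- value (shift in the new bit, drop the oldest) instead of re-slicing and re-folding a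
-- window per position.

-- ===== PORT A =====
-- O(1) indexing for the ports (Python list indexing is O(1)); exact for the
-- nonnegative in-range indices the loops below produce.
def pvIdx (a : Array Int) (i : Int) : Int := a.getD i.toNat 0

def get_second_labels (labels : List Int) (n_left : Int) (n_right : Int) : List Int :=
  let padded := List.replicate n_left.toNat 3 ++ labels ++ List.replicate n_right.toNat 3
  (PySem.List.pyRange n_left ((padded.length : Int) - n_right) 1).foldl (fun second_labels label_idx =>
    let labels_window := PySem.List.slice padded (some (label_idx - n_left)) (some (label_idx + n_right + 1))
    let wa := labels_window.toArray
    let label_sum := (PySem.List.pyRange 1 (labels_window.length : Int) 1).foldl (fun label_sum i =>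
      let label_sum := label_sum * 2
      if pvIdx wa (i - 1) < pvIdx wa i ∧ pvIdx wa i ≠ 3 then label_sum + 1 else label_sum) 0
    second_labels ++ [label_sum]) []


-- ===== PORT B =====
def get_second_labels_alt (labels : List Int) (n_left : Int) (n_right : Int) : List Int :=
  let n := labels.length
  if n = 0 then []
  else
    let padded := List.replicate n_left.toNat 3 ++ labels ++ List.replicate n_right.toNat 3
    let pa := padded.toArray
    let bits := (PySem.List.pyRange 1 (padded.length : Int) 1).map (fun j =>
      if pvIdx pa (j - 1) < pvIdx pa j ∧ pvIdx pa j ≠ 3 then (1 : Int) else 0)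
    let w := n_left + n_right
    let v := (PySem.List.slice bits none (some w)).foldl (fun v b => v * 2 + b) 0
    let shift : Int := 2 ^ w.toNat
    let ba := bits.toArray
    ((List.range (n - 1)).foldl (fun (p : List Int × Int) (k : Nat) =>
      let v := p.2 * 2 + pvIdx ba ((k : Int) + w) - pvIdx ba (k : Int) * shift
      (p.1 ++ [v], v)) ([v], v)).1

-- ===== PRECONDITION & SPEC =====
-- Pre_ excludes negative pad counts, on which A's extra entries come from negative-index
-- slice wraparound and B's own arithmetic (2 ** negative) leaves the integer type.
def Pre_get_second_labels (labels : List Int) (n_left : Int) (n_right : Int) : Prop :=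
  0 ≤ n_left ∧ 0 ≤ n_right
instance (labels : List Int) (n_left : Int) (n_right : Int) : Decidable (Pre_get_second_labels labels n_left n_right) := by unfold Pre_get_second_labels; infer_instance
def pvWitness_get_second_labels : List Int × Int × Int := ([1, 2, 3], 2, 1)

def Spec_get_second_labels (labels : List Int) (n_left : Int) (n_right : Int) (out : List Int) : Prop := out = get_second_labels_alt labels n_left n_right
instance (labels : List Int) (n_left : Int) (n_right : Int) (out : List Int) : Decidable (Spec_get_second_labels labels n_left n_right out) := by unfold Spec_get_second_labels; infer_instance

-- ===== CLAIM (what is proved, stated in full; the proofs are below) =====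
def Claim_equal_get_second_labels : Prop := ∀ (labels : List Int) (n_left : Int) (n_right : Int), Dom_get_second_labels labels n_left n_right → Pre_get_second_labels labels n_left n_right → Spec_get_second_labels labels n_left n_right (get_second_labels labels n_left n_right)

-- ===== LEMMAS AND PROOFS =====

def pvHorner (l : List Int) : Int := l.foldl (fun v b => v * 2 + b) 0

lemma pvIdx_natCast (l : List Int) (n : Nat) : pvIdx l.toArray (n : Int) = l.getD n 0 := by
  simp [pvIdx, Array.getD, List.getD]
  split_ifs with h <;> simp_all

lemma pyRange_one_eq (a b : Int) :
    PySem.List.pyRange a b 1 = (List.range (b - a).toNat).map (fun (k : Nat) => a + (k : Int)) := by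
  simp only [PySem.List.pyRange]
  norm_num
  split_ifs with h
  · rfl
  · have : (b - a).toNat = 0 := by omega
    simp [this]

lemma hornerAux (l : List Int) (a : Int) :
    l.foldl (fun v b => v * 2 + b) a = a * 2 ^ l.length + pvHorner l := by
  induction l generalizing a with
  | nil => simp [pvHorner]
  | cons b l ih =>
    simp only [List.foldl_cons, List.length_cons, pvHorner]
    rw [ih (a * 2 + b)]
    rw [show (0:Int) * 2 + b = b by ring, ih b]
    ring

lemma horner_snoc (l : List Int) (c : Int) : pvHorner (l ++ [c]) = pvHorner l * 2 + c := by
  simp [pvHorner, List.foldl_append]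

lemma horner_cons (b : Int) (l : List Int) : pvHorner (b :: l) = b * 2 ^ l.length + pvHorner l := by
  have := hornerAux l b
  simp only [pvHorner, List.foldl_cons]
  simpa using this

lemma seg_snoc (bs : List Int) (k W : Nat) (h : k + W < bs.length) :
    (bs.drop k).take (W + 1) = (bs.drop k).take W ++ [bs.getD (k + W) 0] := by
  rw [List.take_add_one]
  congr 1
  rw [List.getElem?_drop, List.getElem?_eq_getElem (by omega), List.getD_eq_getElem _ _ h]
  simp

lemma seg_cons (bs : List Int) (k W : Nat) (h : k < bs.length) :
    (bs.drop k).take (W + 1) = bs.getD k 0 :: ((bs.drop (k + 1)).take W) := by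
  rw [List.drop_eq_getElem_cons h, List.take_succ_cons, List.getD_eq_getElem _ _ h]

def pvBit (p : List Int) (j : Nat) : Int :=
  if p.getD j 0 < p.getD (j + 1) 0 ∧ p.getD (j + 1) 0 ≠ 3 then 1 else 0
def pvBits (p : List Int) : List Int := (List.range (p.length - 1)).map (pvBit p)

lemma horner_step (bs : List Int) (W k : Nat) (h : k + W < bs.length) :
    pvHorner ((bs.drop k).take W) * 2 + bs.getD (k + W) 0 - bs.getD k 0 * 2 ^ W
      = pvHorner ((bs.drop (k + 1)).take W) := by
  have h1 : pvHorner ((bs.drop k).take (W + 1)) = pvHorner ((bs.drop k).take W) * 2 + bs.getD (k + W) 0 := by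
    rw [seg_snoc bs k W h, horner_snoc]
  have hlen : ((bs.drop (k + 1)).take W).length = W := by
    simp [List.length_take, List.length_drop]; omega
  have h2 : pvHorner ((bs.drop k).take (W + 1)) = bs.getD k 0 * 2 ^ W + pvHorner ((bs.drop (k + 1)).take W) := by
    rw [seg_cons bs k W (by omega), horner_cons, hlen]
  omega

lemma bits_window (p : List Int) (k W : Nat) (h : k + W + 1 ≤ p.length) :
    pvBits ((p.drop k).take (W + 1)) = ((pvBits p).drop k).take W := by
  have hw : ((p.drop k).take (W + 1)).length = W + 1 := by
    simp [List.length_take, List.length_drop]; omega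
  have hb : (pvBits p).length = p.length - 1 := by simp [pvBits]
  apply List.ext_getElem
  · simp [pvBits, hw]; omega
  · intro i hi1 hi2
    have hiW : i < W := by simp [pvBits, hw] at hi1; omega
    have e1 : ∀ j, j < W + 1 → ((p.drop k).take (W + 1)).getD j 0 = p.getD (k + j) 0 := by
      intro j hj
      rw [List.getD_eq_getElem _ _ (by omega), List.getElem_take, List.getElem_drop,
          List.getD_eq_getElem _ _ (by omega)]
    simp only [pvBits, List.getElem_map, List.getElem_range, List.getElem_take, List.getElem_drop]
    simp only [pvBit]
    rw [e1 i (by omega), e1 (i+1) (by omega)]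
    ring_nf

lemma roll (bs : List Int) (W : Nat) (N : Nat) (h : N + W ≤ bs.length) :
    (List.range N).foldl (fun (p : List Int × Int) k =>
        let v := p.2 * 2 + bs.getD (k + W) 0 - bs.getD k 0 * 2 ^ W
        (p.1 ++ [v], v)) ([pvHorner (bs.take W)], pvHorner (bs.take W))
      = ((List.range (N + 1)).map (fun k => pvHorner ((bs.drop k).take W)),
         pvHorner ((bs.drop N).take W)) := by
  induction N with
  | zero => simp
  | succ N ih =>
    rw [List.range_succ, List.foldl_append, ih (by omega)]
    simp only [List.foldl_cons, List.foldl_nil]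
    rw [List.range_succ (n := N + 1), List.map_append]
    rw [horner_step bs W N (by omega)]
    simp

lemma pyRange_one_map {α : Type} (a b : Int) (f : Int → α) :
    (PySem.List.pyRange a b 1).map f
      = (List.range (b - a).toNat).map (fun (k : Nat) => f (a + (k : Int))) := by
  rw [pyRange_one_eq, List.map_map]
  rfl

lemma bits_eq (p : List Int) :
    (PySem.List.pyRange 1 (p.length : Int) 1).map (fun j =>
      if pvIdx p.toArray (j - 1) < pvIdx p.toArray j ∧
         pvIdx p.toArray j ≠ 3 then (1 : Int) else 0) = pvBits p := by
  rw [pyRange_one_map]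
  have hn : ((p.length : Int) - 1).toNat = p.length - 1 := by omega
  rw [hn]
  unfold pvBits
  apply List.map_congr_left
  intro k hk
  have e1 : (1 : Int) + (k : Int) - 1 = ((k : Nat) : Int) := by ring
  have e2 : (1 : Int) + (k : Int) = ((k + 1 : Nat) : Int) := by push_cast; ring
  show (if pvIdx p.toArray ((1:Int) + (k:Int) - 1) < pvIdx p.toArray ((1:Int) + (k:Int)) ∧
      pvIdx p.toArray ((1:Int) + (k:Int)) ≠ 3 then (1:Int) else 0) = pvBit p k
  rw [e1, e2, pvIdx_natCast, pvIdx_natCast, pvBit]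

lemma inner_horner (w : List Int) :
    (PySem.List.pyRange 1 (w.length : Int) 1).foldl (fun label_sum i =>
      let label_sum := label_sum * 2
      if pvIdx w.toArray (i - 1) < pvIdx w.toArray i ∧
         pvIdx w.toArray i ≠ 3 then label_sum + 1 else label_sum) 0
      = pvHorner (pvBits w) := by
  rw [← bits_eq w, pvHorner, List.foldl_map]
  have : (fun (label_sum : Int) (i : Int) =>
      let label_sum := label_sum * 2
      if pvIdx w.toArray (i - 1) < pvIdx w.toArray i ∧
         pvIdx w.toArray i ≠ 3 then label_sum + 1 else label_sum)
      = (fun s i => s * 2 + (if pvIdx w.toArray (i - 1) < pvIdx w.toArray i ∧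
         pvIdx w.toArray i ≠ 3 then (1:Int) else 0)) := by
    funext s i
    by_cases h : pvIdx w.toArray (i - 1) < pvIdx w.toArray i ∧ pvIdx w.toArray i ≠ 3 <;>
      simp [h]
  rw [this]

lemma inner_horner' (w : List Int) :
    (PySem.List.pyRange 1 (w.length : Int) 1).foldl (fun label_sum i =>
      if pvIdx w.toArray (i - 1) < pvIdx w.toArray i ∧
         pvIdx w.toArray i ≠ 3 then label_sum * 2 + 1 else label_sum * 2) 0
      = pvHorner (pvBits w) := by
  have h2 : (fun (label_sum : Int) (i : Int) =>
      if pvIdx w.toArray (i - 1) < pvIdx w.toArray i ∧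
         pvIdx w.toArray i ≠ 3 then label_sum * 2 + 1 else label_sum * 2)
      = (fun (label_sum : Int) (i : Int) =>
      let label_sum := label_sum * 2
      if pvIdx w.toArray (i - 1) < pvIdx w.toArray i ∧
         pvIdx w.toArray i ≠ 3 then label_sum + 1 else label_sum) := by
    funext s i
    by_cases h : pvIdx w.toArray (i - 1) < pvIdx w.toArray i ∧ pvIdx w.toArray i ≠ 3 <;>
      simp [h]
  rw [h2, inner_horner]

lemma A_char (labels : List Int) (L R : Nat) :
    get_second_labels labels (L : Int) (R : Int)
      = (List.range labels.length).map (fun k =>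
          pvHorner (((pvBits (List.replicate L 3 ++ labels ++ List.replicate R 3)).drop k).take (L + R))) := by
  unfold get_second_labels
  simp only [Int.toNat_natCast]
  rw [PySem.List.foldl_append_singleton_eq_map, List.nil_append, pyRange_one_map]
  have hp : (List.replicate L 3 ++ labels ++ List.replicate R 3).length = L + labels.length + R := by
    simp; omega
  rw [hp]
  have hcount : (((L + labels.length + R : Nat) : Int) - (R : Int) - (L : Int)).toNat = labels.length := by
    push_cast; omega
  rw [hcount]
  apply List.map_congr_left
  intro k hk
  have hkn : k < labels.length := List.mem_range.mp hk
  have e1 : (L : Int) + (k : Int) - (L : Int) = ((k : Nat) : Int) := by ring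
  have e2 : (L : Int) + (k : Int) + (R : Int) + 1 = ((k + (L + R) + 1 : Nat) : Int) := by push_cast; ring
  have e3 : k + (L + R) + 1 - k = L + R + 1 := by omega
  simp only [e1, e2, PySem.List.slice_natCast, e3]
  rw [inner_horner', bits_window _ k (L + R) (by simp; omega)]

def pvAltL (labels : List Int) (L R : Nat) : List Int :=
  let n := labels.length
  if n = 0 then []
  else
    let padded := List.replicate L 3 ++ labels ++ List.replicate R 3
    let pa := padded.toArray
    let bits := (PySem.List.pyRange 1 (padded.length : Int) 1).map (fun j =>
      if pvIdx pa (j - 1) < pvIdx pa j ∧ pvIdx pa j ≠ 3 then (1 : Int) else 0)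
    let w := (L : Int) + (R : Int)
    let v := (PySem.List.slice bits none (some w)).foldl (fun v b => v * 2 + b) 0
    let shift : Int := 2 ^ w.toNat
    let ba := bits.toArray
    ((List.range (n - 1)).foldl (fun (p : List Int × Int) (k : Nat) =>
      let v := p.2 * 2 + pvIdx ba ((k : Int) + w) - pvIdx ba (k : Int) * shift
      (p.1 ++ [v], v)) ([v], v)).1

lemma alt_eq_pvAltL (labels : List Int) (L R : Nat) :
    get_second_labels_alt labels (L : Int) (R : Int) = pvAltL labels L R := rfl

lemma B_char (labels : List Int) (L R : Nat) :
    get_second_labels_alt labels (L : Int) (R : Int)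
      = (List.range labels.length).map (fun k =>
          pvHorner (((pvBits (List.replicate L 3 ++ labels ++ List.replicate R 3)).drop k).take (L + R))) := by
  rw [alt_eq_pvAltL]
  unfold pvAltL
  by_cases hn : labels.length = 0
  · simp [hn]
  · simp only [hn, if_false]
    simp only [bits_eq]
    have ew : (L : Int) + (R : Int) = ((L + R : Nat) : Int) := by push_cast; ring
    rw [ew, PySem.List.slice_to _ (by positivity), Int.toNat_natCast]
    have hfun : (fun (p : List Int × Int) (k : Nat) =>
        let v := p.2 * 2 + pvIdx (pvBits (List.replicate L 3 ++ labels ++ List.replicate R 3)).toArray ((k : Int) + ((L + R : Nat) : Int))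
                 - pvIdx (pvBits (List.replicate L 3 ++ labels ++ List.replicate R 3)).toArray (k : Int) * 2 ^ (L + R)
        (p.1 ++ [v], v))
      = (fun (p : List Int × Int) (k : Nat) =>
        let v := p.2 * 2 + (pvBits (List.replicate L 3 ++ labels ++ List.replicate R 3)).getD (k + (L + R)) 0
                 - (pvBits (List.replicate L 3 ++ labels ++ List.replicate R 3)).getD k 0 * 2 ^ (L + R)
        (p.1 ++ [v], v)) := by
      funext p k
      have ec : (k : Int) + ((L + R : Nat) : Int) = ((k + (L + R) : Nat) : Int) := by push_cast; ring
      rw [ec, pvIdx_natCast, pvIdx_natCast]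
    rw [hfun]
    have hv : List.foldl (fun (v b : Int) => v * 2 + b) 0 ((pvBits (List.replicate L 3 ++ labels ++ List.replicate R 3)).take (L + R))
        = pvHorner ((pvBits (List.replicate L 3 ++ labels ++ List.replicate R 3)).take (L + R)) := rfl
    rw [hv]
    have hlen : (pvBits (List.replicate L 3 ++ labels ++ List.replicate R 3)).length
        = L + labels.length + R - 1 := by simp [pvBits]; omega
    rw [roll _ (L + R) (labels.length - 1) (by rw [hlen]; omega)]
    have : labels.length - 1 + 1 = labels.length := by omega
    rw [this]

-- ===== VERDICT (by name: the statement is the Claim_ definition above) =====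
theorem get_second_labels_spec : Claim_equal_get_second_labels := by
  intro labels n_left n_right _ hpre
  obtain ⟨h1, h2⟩ := hpre
  unfold Spec_get_second_labels
  rw [show n_left = (n_left.toNat : Int) from (Int.toNat_of_nonneg h1).symm,
      show n_right = (n_right.toNat : Int) from (Int.toNat_of_nonneg h2).symm,
      A_char, B_char]
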